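-- pv_equiv track=rewrite | github.com/louismeuret/ARNy_Plotter | src/core/app.py | get_shared_computations
-- ===== SOURCE A (Python) =====
-- from typing import Dict, Any, Optional, Tuple
-- from typing import Dict, List, Optional
--
-- def get_shared_computations(selected_plots: List[str]) -> Dict[str, List[str]]:
--     """Identify computations that can be shared between plots"""
--     shared_computations = {}
--
--     # Map computation types to plots that need them
--     # Simple mapping based on plot types
--     plot_to_computation = {
--         'RMSD': 'rmsd',
--         'ERMSD': 'ermsd',
--         'TORSION': 'torsion',
--         'SEC_STRUCTURE': 'annotate',
--         'DOTBRACKET': 'annotate',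
--         'ARC': 'annotate',
--         'CONTACT_MAPS': 'annotate',
--         'ANNOTATE': 'annotate',
--         'DS_MOTIF': 'motif',
--         'SS_MOTIF': 'motif',
--         'JCOUPLING': 'jcoupling',
--         'ESCORE': 'escore',
--         'LANDSCAPE': 'landscape',
--         'BASE_PAIRING': 'base_pairing'
--     }
--
--     computation_to_plots = {}
--     for plot in selected_plots:
--         if plot in plot_to_computation:
--             calc_type = plot_to_computation[plot]
--             if calc_type not in computation_to_plots:
--                 computation_to_plots[calc_type] = []
--             computation_to_plots[calc_type].append(plot)
--
--     # Identify shared computations (needed by multiple plots)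
--     for calc_type, plots in computation_to_plots.items():
--         if len(plots) > 1:
--             shared_computations[calc_type] = plots
--
--     return shared_computations
-- ===== SOURCE B (Python) =====
-- def get_shared_computations(selected_plots):
--     """Identify computations that can be shared between plots"""
--     plot_to_computation = {
--         'RMSD': 'rmsd',
--         'ERMSD': 'ermsd',
--         'TORSION': 'torsion',
--         'SEC_STRUCTURE': 'annotate',
--         'DOTBRACKET': 'annotate',
--         'ARC': 'annotate',
--         'CONTACT_MAPS': 'annotate',
--         'ANNOTATE': 'annotate',
--         'DS_MOTIF': 'motif',
--         'SS_MOTIF': 'motif',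
--         'JCOUPLING': 'jcoupling',
--         'ESCORE': 'escore',
--         'LANDSCAPE': 'landscape',
--         'BASE_PAIRING': 'base_pairing'
--     }
--     # (calc_type, plot) for every recognised plot, in original order
--     pairs = [(plot_to_computation[p], p) for p in selected_plots if p in plot_to_computation]
--     # calc types in first-occurrence order
--     calc_types = list(dict.fromkeys(c for c, _ in pairs))
--     return {c: group
--             for c in calc_types
--             if len(group := [p for cc, p in pairs if cc == c]) > 1}
-- ===== Notes on version B (the rewrite author's own statement) =====
-- stated objective: alternative
-- what changed: Replaces A's two imperative dict-building loops (incremental grouping dict, then a filtering pass over its items) with a declarative pipeline: a flat (calc_type, plot) pair list, an ordered dedup of the calc types, and one comprehension that re-scans the pair list per calc type to build only the shared groups.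
import Mathlib
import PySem

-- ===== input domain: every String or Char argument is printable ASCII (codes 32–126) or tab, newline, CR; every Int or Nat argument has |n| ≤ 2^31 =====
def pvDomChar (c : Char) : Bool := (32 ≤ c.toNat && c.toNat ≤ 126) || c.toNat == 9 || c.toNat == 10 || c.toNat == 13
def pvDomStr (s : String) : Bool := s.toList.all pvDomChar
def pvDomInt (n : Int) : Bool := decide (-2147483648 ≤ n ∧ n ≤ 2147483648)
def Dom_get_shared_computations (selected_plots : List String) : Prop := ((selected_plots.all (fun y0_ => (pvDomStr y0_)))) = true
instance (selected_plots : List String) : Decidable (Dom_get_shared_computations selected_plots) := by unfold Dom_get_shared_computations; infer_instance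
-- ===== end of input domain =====

-- B replaces A's two dict-building loops by a pair list + ordered dedup + per-type comprehension (alternative decomposition, same results).

-- shared constant table (identical literal in both Pythons)
def plotToComputation : PySem.Dict String String := PySem.Dict.ofList [
  ("RMSD", "rmsd"), ("ERMSD", "ermsd"), ("TORSION", "torsion"),
  ("SEC_STRUCTURE", "annotate"), ("DOTBRACKET", "annotate"), ("ARC", "annotate"),
  ("CONTACT_MAPS", "annotate"), ("ANNOTATE", "annotate"),
  ("DS_MOTIF", "motif"), ("SS_MOTIF", "motif"),
  ("JCOUPLING", "jcoupling"), ("ESCORE", "escore"),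
  ("LANDSCAPE", "landscape"), ("BASE_PAIRING", "base_pairing")]

-- ===== PORT A =====
-- first loop: build computation_to_plots (insert [] on first sight, then append)
def gscStep (d : PySem.Dict String (List String)) (plot : String) : PySem.Dict String (List String) :=
  match plotToComputation.get? plot with
  | some calc_type =>
      let d := if d.contains calc_type then d else d.insert calc_type []
      d.modify calc_type [] (fun v => v ++ [plot])
  | none => d

def get_shared_computations (selected_plots : List String) : List (String × List String) :=
  let computation_to_plots := selected_plots.foldl gscStep PySem.Dict.empty
  -- second loop: keep groups with more than one plot
  let shared_computations := computation_to_plots.items.foldl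
    (fun acc q => if q.2.length > 1 then acc.insert q.1 q.2 else acc) PySem.Dict.empty
  shared_computations.items

-- ===== PORT B =====
def get_shared_computations_alt (selected_plots : List String) : List (String × List String) :=
  let pairs := selected_plots.filterMap
    (fun p => (plotToComputation.get? p).map (fun c => (c, p)))
  let calc_types := PySem.List.dedup (pairs.map (fun q => q.1))
  calc_types.filterMap (fun c =>
    let group := (pairs.filter (fun q => q.1 == c)).map (fun q => q.2)
    if group.length > 1 then some (c, group) else none)

-- ===== PRECONDITION & SPEC =====
def Spec_get_shared_computations (selected_plots : List String) (out : List (String × List String)) : Prop := out = get_shared_computations_alt selected_plots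
instance (selected_plots : List String) (out : List (String × List String)) : Decidable (Spec_get_shared_computations selected_plots out) := by unfold Spec_get_shared_computations; infer_instance

-- ===== CLAIM (what is proved, stated in full; the proofs are below) =====
def Claim_equal_get_shared_computations : Prop := ∀ (selected_plots : List String), Dom_get_shared_computations selected_plots → Spec_get_shared_computations selected_plots (get_shared_computations selected_plots)

-- ===== LEMMAS AND PROOFS =====

-- A's "insert [] if absent, then append" step equals a single modify
lemma gscStep_eq_modify (d : PySem.Dict String (List String)) (p : String) :
    gscStep d p = match plotToComputation.get? p with
      | some c => d.modify c [] (fun v => v ++ [p])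
      | none => d := by
  unfold gscStep
  cases plotToComputation.get? p with
  | none => rfl
  | some c =>
    simp only
    by_cases h : d.contains c = true
    · simp [h]
    · simp only [eq_false_of_ne_true h]
      simp [PySem.Dict.modify, PySem.Dict.insert_insert_self,
            PySem.Dict.getD_insert_self,
            PySem.Dict.getD_of_not_contains d [] (eq_false_of_ne_true h)]

-- A's first loop over plots equals the modify-fold over B's pair list
lemma foldl_gscStep_eq (sp : List String) (d : PySem.Dict String (List String)) :
    sp.foldl gscStep d =
      (sp.filterMap (fun p => (plotToComputation.get? p).map (fun c => (c, p)))).foldl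
        (fun d q => d.modify q.1 [] (fun v => v ++ [q.2])) d := by
  induction sp generalizing d with
  | nil => rfl
  | cons p t ih =>
    simp only [List.foldl_cons, List.filterMap_cons, gscStep_eq_modify]
    cases plotToComputation.get? p with
    | none => exact ih d
    | some c => simpa using ih (d.modify c [] (fun v => v ++ [p]))

-- A's second loop (conditional insert over fresh distinct keys) filters the items
lemma foldl_if_insert_items (l : List (String × List String))
    (d : PySem.Dict String (List String))
    (hfresh : ∀ q ∈ l, d.contains q.1 = false)
    (hnd : (l.map (fun q => q.1)).Nodup) :
    (l.foldl (fun acc q => if q.2.length > 1 then acc.insert q.1 q.2 else acc) d).items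
      = d.items ++ l.filter (fun q => q.2.length > 1) := by
  induction l generalizing d with
  | nil => simp
  | cons a t ih =>
    simp only [List.map_cons, List.nodup_cons, List.mem_map] at hnd
    obtain ⟨ha, hndt⟩ := hnd
    simp only [List.foldl_cons, List.filter_cons]
    by_cases h : a.2.length > 1
    · have hd' : ∀ q ∈ t, (d.insert a.1 a.2).contains q.1 = false := by
        intro q hq
        rw [PySem.Dict.contains_insert]
        have hne : (q.1 == a.1) = false := by
          simp only [beq_eq_false_iff_ne, ne_eq]
          intro hEq; exact ha ⟨q, hq, hEq⟩
        simp [hne, hfresh q (List.mem_cons_of_mem _ hq)]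
      rw [if_pos h, ih (d.insert a.1 a.2) hd' hndt,
          PySem.Dict.items_insert_of_not_contains d a.2 (hfresh a (List.mem_cons_self))]
      simp [h]
    · rw [if_neg h, ih d (fun q hq => hfresh q (List.mem_cons_of_mem _ hq)) hndt]
      simp [h]

-- filterMap of an if-some over a map'd filter
lemma filterMap_if_eq_filter_map {α β : Type} (l : List α) (f : α → β) (p : β → Bool) :
    l.filterMap (fun c => if p (f c) then some (f c) else none)
      = (l.map f).filter p := by
  induction l with
  | nil => rfl
  | cons a t ih =>
    simp only [List.filterMap_cons, List.map_cons, List.filter_cons]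
    by_cases h : p (f a) <;> simp [h, ih]

-- ===== VERDICT (by name: the statement is the Claim_ definition above) =====
theorem get_shared_computations_spec : Claim_equal_get_shared_computations := by
  intro sp _
  show get_shared_computations sp = get_shared_computations_alt sp
  unfold get_shared_computations get_shared_computations_alt
  set pairs := sp.filterMap (fun p => (plotToComputation.get? p).map (fun c => (c, p))) with hpairs
  set ctp := sp.foldl gscStep PySem.Dict.empty with hctp
  have hfold : ctp = pairs.foldl (fun d q => d.modify q.1 [] (fun v => v ++ [q.2]))
      PySem.Dict.empty := foldl_gscStep_eq sp PySem.Dict.empty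
  have hkeys : ctp.keys = PySem.List.dedup (pairs.map (fun q => q.1)) := by
    rw [hfold, PySem.Dict.keys_foldl_modify_key pairs (fun q => q.1) []
          (fun _ q v => v ++ [q.2]) PySem.Dict.empty]
    simp [PySem.List.dedup, PySem.Set.ofList, PySem.Set.update, PySem.Dict.keys_empty]
  have hnd : ctp.keys.Nodup := by
    rw [hfold]
    exact PySem.Dict.nodup_keys_foldl_modify_key pairs (fun q => q.1) []
      (fun _ q v => v ++ [q.2]) PySem.Dict.empty (by simp)
  have hgetD : ∀ c, ctp.getD c [] = (pairs.filter (fun q => q.1 == c)).map (fun q => q.2) := by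
    intro c
    rw [hfold, PySem.Dict.getD_foldl_modify_append]
    simp
  have hitems : ctp.items = ctp.keys.map (fun c => (c, ctp.getD c [])) :=
    PySem.Dict.items_eq_map_keys ctp hnd []
  have hndfst : (ctp.items.map (fun q => q.1)).Nodup := by
    have hcomp : ((fun q : String × List String => q.1) ∘ (fun c => (c, ctp.getD c []))) = id := rfl
    rw [hitems, List.map_map, hcomp, List.map_id]
    exact hnd
  show (ctp.items.foldl
      (fun acc q => if q.2.length > 1 then acc.insert q.1 q.2 else acc) PySem.Dict.empty).items
    = (PySem.List.dedup (pairs.map (fun q => q.1))).filterMap (fun c =>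
        let group := (pairs.filter (fun q => q.1 == c)).map (fun q => q.2)
        if group.length > 1 then some (c, group) else none)
  rw [foldl_if_insert_items ctp.items PySem.Dict.empty
        (fun q _ => PySem.Dict.contains_empty q.1) hndfst]
  have hempty : (PySem.Dict.empty : PySem.Dict String (List String)).items = [] := rfl
  rw [hempty, List.nil_append, hitems, hkeys, ← filterMap_if_eq_filter_map]
  apply List.filterMap_congr
  intro c _
  simp [hgetD c]
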